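-- pv_equiv track=rewrite | github.com/arnav-verma200/webbrowser | parser/css_parser.py | expand_shorthand
-- ===== SOURCE A (Python) =====
-- def expand_shorthand(prop, val):
--     expanded = {}
--     if prop == "font":
--         parts = val.split()
--         style = "normal"
--         weight = "normal"
--         size = None
--         for part in parts:
--             if part in ["italic", "oblique", "normal"]:
--                 style = part
--             elif part in ["bold", "bolder", "lighter", "normal"] or part.isdigit():
--                 weight = part
--             elif any(unit in part for unit in ["px", "%", "em", "pt", "rem"]):
--                 size = part
--         if size:
--             expanded["font-style"] = style
--             expanded["font-weight"] = weight
--             expanded["font-size"] = size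
--     elif prop == "margin":
--         parts = val.split()
--         if len(parts) == 1:
--             expanded["margin-top"] = parts[0]
--             expanded["margin-right"] = parts[0]
--             expanded["margin-bottom"] = parts[0]
--             expanded["margin-left"] = parts[0]
--         elif len(parts) == 2:
--             expanded["margin-top"] = parts[0]
--             expanded["margin-bottom"] = parts[0]
--             expanded["margin-right"] = parts[1]
--             expanded["margin-left"] = parts[1]
--         elif len(parts) == 3:
--             expanded["margin-top"] = parts[0]
--             expanded["margin-right"] = parts[1]
--             expanded["margin-left"] = parts[1]
--             expanded["margin-bottom"] = parts[2]
--         elif len(parts) == 4: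
--             expanded["margin-top"] = parts[0]
--             expanded["margin-right"] = parts[1]
--             expanded["margin-bottom"] = parts[2]
--             expanded["margin-left"] = parts[3]
--     elif prop == "padding":
--         parts = val.split()
--         if len(parts) == 1:
--             expanded["padding-top"] = parts[0]
--             expanded["padding-right"] = parts[0]
--             expanded["padding-bottom"] = parts[0]
--             expanded["padding-left"] = parts[0]
--         elif len(parts) == 2:
--             expanded["padding-top"] = parts[0]
--             expanded["padding-bottom"] = parts[0]
--             expanded["padding-right"] = parts[1]
--             expanded["padding-left"] = parts[1]
--         elif len(parts) == 3:
--             expanded["padding-top"] = parts[0]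
--             expanded["padding-right"] = parts[1]
--             expanded["padding-left"] = parts[1]
--             expanded["padding-bottom"] = parts[2]
--         elif len(parts) == 4:
--             expanded["padding-top"] = parts[0]
--             expanded["padding-right"] = parts[1]
--             expanded["padding-bottom"] = parts[2]
--             expanded["padding-left"] = parts[3]
--     else:
--         expanded[prop] = val
--     return expanded
-- ===== SOURCE B (Python) =====
-- _LAYOUTS = {
--     1: [("top", 0), ("right", 0), ("bottom", 0), ("left", 0)],
--     2: [("top", 0), ("bottom", 0), ("right", 1), ("left", 1)],
--     3: [("top", 0), ("right", 1), ("left", 1), ("bottom", 2)],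
--     4: [("top", 0), ("right", 1), ("bottom", 2), ("left", 3)],
-- }
-- _UNITS = ("px", "%", "em", "pt", "rem")
--
-- def expand_shorthand(prop, val):
--     if prop == "font":
--         parts = val.split()
--         styles = [p for p in parts if p in ("italic", "oblique", "normal")]
--         weights = [p for p in parts if p in ("bold", "bolder", "lighter") or p.isdigit()]
--         sizes = [p for p in parts if any(u in p for u in _UNITS)]
--         if not sizes:
--             return {}
--         return {"font-style": styles[-1] if styles else "normal",
--                 "font-weight": weights[-1] if weights else "normal",
--                 "font-size": sizes[-1]}
--     if prop in ("margin", "padding"):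
--         parts = val.split()
--         return {f"{prop}-{side}": parts[i]
--                 for side, i in _LAYOUTS.get(len(parts), [])}
--     return {prop: val}
-- ===== Notes on version B (the rewrite author's own statement) =====
-- stated objective: simpler
-- what changed: The eight explicit per-side assignment branches for margin/padding become one table-driven dict comprehension over a count->layout table shared by both properties, and the font loop with three mutable variables becomes three filter comprehensions taking the last match of each category.
import Mathlib
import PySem

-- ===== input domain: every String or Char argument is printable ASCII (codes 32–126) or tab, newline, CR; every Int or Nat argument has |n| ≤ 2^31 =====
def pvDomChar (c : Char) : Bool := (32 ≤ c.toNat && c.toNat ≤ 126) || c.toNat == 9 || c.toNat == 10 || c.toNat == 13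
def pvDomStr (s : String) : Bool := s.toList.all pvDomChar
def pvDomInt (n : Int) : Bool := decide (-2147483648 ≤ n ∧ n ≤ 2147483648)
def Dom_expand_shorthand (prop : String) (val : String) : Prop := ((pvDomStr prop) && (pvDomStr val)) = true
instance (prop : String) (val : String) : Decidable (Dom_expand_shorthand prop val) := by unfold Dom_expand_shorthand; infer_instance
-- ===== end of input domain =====

-- B replaces A's eight per-side assignment branches by one count->layout table shared by margin
-- and padding, and A's font loop with three mutable variables by three filters taking the last
-- match of each category (objective: simpler; same asymptotic cost).

-- ===== PORT A =====
-- one loop step of A's font for-loop over the state (style, weight, size)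
def pvFontStep (acc : String × String × Option String) (part : String) : String × String × Option String :=
  if ["italic", "oblique", "normal"].contains part then (part, acc.2.1, acc.2.2)
  else if ["bold", "bolder", "lighter", "normal"].contains part || PySem.Str.strIsdigit part then
    (acc.1, part, acc.2.2)
  else if ["px", "%", "em", "pt", "rem"].any (fun u => PySem.Str.isIn u part) then
    (acc.1, acc.2.1, some part)
  else acc

-- parts[i] is ported as pyGetD parts i "" : every access sits under the matching length guard,
-- so the index is always in range and Python never raises here.
def expand_shorthand (prop : String) (val : String) : List (String × String) :=
  if prop == "font" then
    let parts := PySem.Str.split₀ val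
    let res := parts.foldl pvFontStep ("normal", "normal", none)
    let expanded : PySem.Dict String String :=
      match res.2.2 with
      | none => PySem.Dict.empty        -- `if size:` — None is falsy
      | some sz =>
        if sz == "" then PySem.Dict.empty   -- `if size:` — the empty string is falsy
        else (((PySem.Dict.empty).insert "font-style" res.1).insert "font-weight" res.2.1).insert
              "font-size" sz
    expanded.items
  else if prop == "margin" then
    let parts := PySem.Str.split₀ val
    let expanded : PySem.Dict String String :=
      if parts.length == 1 then
        ((((PySem.Dict.empty).insert "margin-top" (PySem.List.pyGetD parts 0 "")).insert
            "margin-right" (PySem.List.pyGetD parts 0 "")).insert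
            "margin-bottom" (PySem.List.pyGetD parts 0 "")).insert
            "margin-left" (PySem.List.pyGetD parts 0 "")
      else if parts.length == 2 then
        ((((PySem.Dict.empty).insert "margin-top" (PySem.List.pyGetD parts 0 "")).insert
            "margin-bottom" (PySem.List.pyGetD parts 0 "")).insert
            "margin-right" (PySem.List.pyGetD parts 1 "")).insert
            "margin-left" (PySem.List.pyGetD parts 1 "")
      else if parts.length == 3 then
        ((((PySem.Dict.empty).insert "margin-top" (PySem.List.pyGetD parts 0 "")).insert
            "margin-right" (PySem.List.pyGetD parts 1 "")).insert
            "margin-left" (PySem.List.pyGetD parts 1 "")).insert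
            "margin-bottom" (PySem.List.pyGetD parts 2 "")
      else if parts.length == 4 then
        ((((PySem.Dict.empty).insert "margin-top" (PySem.List.pyGetD parts 0 "")).insert
            "margin-right" (PySem.List.pyGetD parts 1 "")).insert
            "margin-bottom" (PySem.List.pyGetD parts 2 "")).insert
            "margin-left" (PySem.List.pyGetD parts 3 "")
      else PySem.Dict.empty
    expanded.items
  else if prop == "padding" then
    let parts := PySem.Str.split₀ val
    let expanded : PySem.Dict String String :=
      if parts.length == 1 then
        ((((PySem.Dict.empty).insert "padding-top" (PySem.List.pyGetD parts 0 "")).insert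
            "padding-right" (PySem.List.pyGetD parts 0 "")).insert
            "padding-bottom" (PySem.List.pyGetD parts 0 "")).insert
            "padding-left" (PySem.List.pyGetD parts 0 "")
      else if parts.length == 2 then
        ((((PySem.Dict.empty).insert "padding-top" (PySem.List.pyGetD parts 0 "")).insert
            "padding-bottom" (PySem.List.pyGetD parts 0 "")).insert
            "padding-right" (PySem.List.pyGetD parts 1 "")).insert
            "padding-left" (PySem.List.pyGetD parts 1 "")
      else if parts.length == 3 then
        ((((PySem.Dict.empty).insert "padding-top" (PySem.List.pyGetD parts 0 "")).insert
            "padding-right" (PySem.List.pyGetD parts 1 "")).insert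
            "padding-left" (PySem.List.pyGetD parts 1 "")).insert
            "padding-bottom" (PySem.List.pyGetD parts 2 "")
      else if parts.length == 4 then
        ((((PySem.Dict.empty).insert "padding-top" (PySem.List.pyGetD parts 0 "")).insert
            "padding-right" (PySem.List.pyGetD parts 1 "")).insert
            "padding-bottom" (PySem.List.pyGetD parts 2 "")).insert
            "padding-left" (PySem.List.pyGetD parts 3 "")
      else PySem.Dict.empty
    expanded.items
  else
    ((PySem.Dict.empty).insert prop val).items

-- ===== PORT B =====
-- port of Source B's module constant _LAYOUTS (a dict literal keyed by the token count)
def pvLayouts : PySem.Dict Int (List (String × Int)) :=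
  PySem.Dict.ofList
    [(1, [("top", 0), ("right", 0), ("bottom", 0), ("left", 0)]),
     (2, [("top", 0), ("bottom", 0), ("right", 1), ("left", 1)]),
     (3, [("top", 0), ("right", 1), ("left", 1), ("bottom", 2)]),
     (4, [("top", 0), ("right", 1), ("bottom", 2), ("left", 3)])]

-- parts[i] with i drawn from the layout table is always in range: ported as pyGetD parts i ""
def expand_shorthand_alt (prop : String) (val : String) : List (String × String) :=
  if prop == "font" then
    let parts := PySem.Str.split₀ val
    let styles := parts.filter (fun p => ["italic", "oblique", "normal"].contains p)
    let weights := parts.filter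
      (fun p => ["bold", "bolder", "lighter"].contains p || PySem.Str.strIsdigit p)
    let sizes := parts.filter
      (fun p => ["px", "%", "em", "pt", "rem"].any (fun u => PySem.Str.isIn u p))
    if sizes == [] then []
    else
      ((((PySem.Dict.empty).insert "font-style"
            (if styles == [] then "normal" else PySem.List.pyGetD styles (-1) "normal")).insert
          "font-weight"
            (if weights == [] then "normal" else PySem.List.pyGetD weights (-1) "normal")).insert
          "font-size" (PySem.List.pyGetD sizes (-1) "normal")).items
  else if prop == "margin" || prop == "padding" then
    let parts := PySem.Str.split₀ val
    ((pvLayouts.getD (PySem.List.len parts) []).foldl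
        (fun (d : PySem.Dict String String) si =>
          d.insert (prop ++ "-" ++ si.1) (PySem.List.pyGetD parts si.2 "")) PySem.Dict.empty).items
  else
    ((PySem.Dict.empty).insert prop val).items

-- ===== PRECONDITION & SPEC =====
def Spec_expand_shorthand (prop : String) (val : String) (out : List (String × String)) : Prop := out = expand_shorthand_alt prop val
instance (prop : String) (val : String) (out : List (String × String)) : Decidable (Spec_expand_shorthand prop val out) := by unfold Spec_expand_shorthand; infer_instance

-- ===== CLAIM (what is proved, stated in full; the proofs are below) =====
def Claim_equal_expand_shorthand : Prop := ∀ (prop : String) (val : String), Dom_expand_shorthand prop val → Spec_expand_shorthand prop val (expand_shorthand prop val)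

-- ===== LEMMAS AND PROOFS =====

-- A's compound (elif) category predicates
def pvQS (p : String) : Bool := ["italic", "oblique", "normal"].contains p
def pvQW (p : String) : Bool :=
  !pvQS p && (["bold", "bolder", "lighter", "normal"].contains p || PySem.Str.strIsdigit p)
def pvQU (p : String) : Bool :=
  !pvQS p && (!(["bold", "bolder", "lighter", "normal"].contains p || PySem.Str.strIsdigit p)
    && ["px", "%", "em", "pt", "rem"].any (fun u => PySem.Str.isIn u p))

-- A's font loop computes, componentwise, the last element of each (disjoint) category
-- how one step of A's loop acts, by which elif branch fires
theorem pvStep_S (acc : String × String × Option String) (p : String) (h : pvQS p = true) :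
    pvFontStep acc p = (p, acc.2.1, acc.2.2) := by
  unfold pvFontStep; unfold pvQS at h; rw [if_pos h]

theorem pvStep_W (acc : String × String × Option String) (p : String) (h : pvQS p = false)
    (h2 : (["bold", "bolder", "lighter", "normal"].contains p || PySem.Str.strIsdigit p) = true) :
    pvFontStep acc p = (acc.1, p, acc.2.2) := by
  unfold pvFontStep; unfold pvQS at h
  rw [if_neg (by simp_all), if_pos h2]

theorem pvStep_U (acc : String × String × Option String) (p : String) (h : pvQS p = false)
    (h2 : (["bold", "bolder", "lighter", "normal"].contains p || PySem.Str.strIsdigit p) = false)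
    (h3 : (["px", "%", "em", "pt", "rem"].any (fun u => PySem.Str.isIn u p)) = true) :
    pvFontStep acc p = (acc.1, acc.2.1, some p) := by
  unfold pvFontStep; unfold pvQS at h
  rw [if_neg (by simp_all), if_neg (by simp_all), if_pos h3]

theorem pvStep_none (acc : String × String × Option String) (p : String) (h : pvQS p = false)
    (h2 : (["bold", "bolder", "lighter", "normal"].contains p || PySem.Str.strIsdigit p) = false)
    (h3 : (["px", "%", "em", "pt", "rem"].any (fun u => PySem.Str.isIn u p)) = false) :
    pvFontStep acc p = acc := by
  unfold pvFontStep; unfold pvQS at h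
  rw [if_neg (by simp_all), if_neg (by simp_all), if_neg (by simp_all)]

-- A's font loop computes, componentwise, the last element of each (disjoint) category
theorem pvFold_eq (parts : List String) (s w : String) (z : Option String) :
    parts.foldl pvFontStep (s, w, z) =
      ((parts.filter pvQS).getLastD s,
       (parts.filter pvQW).getLastD w,
       ((parts.filter pvQU).map some).getLastD z) := by
  induction parts generalizing s w z with
  | nil => rfl
  | cons p ps ih =>
    rw [List.foldl_cons]
    cases hS : pvQS p with
    | true =>
      have hw : pvQW p = false := by unfold pvQW; rw [hS]; rfl
      have hu : pvQU p = false := by unfold pvQU; rw [hS]; rfl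
      rw [pvStep_S _ _ hS, ih]
      simp only [List.filter_cons, hS, hw, hu, if_true, Bool.false_eq_true, if_false,
        List.getLastD_cons]
    | false =>
      cases hW : (["bold", "bolder", "lighter", "normal"].contains p || PySem.Str.strIsdigit p) with
      | true =>
        have hww : pvQW p = true := by unfold pvQW; rw [hS, hW]; rfl
        have hu : pvQU p = false := by unfold pvQU; rw [hW]; simp
        rw [pvStep_W _ _ hS hW, ih]
        simp only [List.filter_cons, hS, hww, hu, if_true, Bool.false_eq_true, if_false,
          List.getLastD_cons]
      | false =>
        cases hU : (["px", "%", "em", "pt", "rem"].any (fun u => PySem.Str.isIn u p)) with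
        | true =>
          have hw : pvQW p = false := by unfold pvQW; rw [hW]; simp
          have huu : pvQU p = true := by unfold pvQU; rw [hS, hW, hU]; rfl
          rw [pvStep_U _ _ hS hW hU, ih]
          simp only [List.filter_cons, hS, hw, huu, if_true, Bool.false_eq_true, if_false,
            List.map_cons, List.getLastD_cons]
        | false =>
          have hw : pvQW p = false := by unfold pvQW; rw [hW]; simp
          have hu : pvQU p = false := by unfold pvQU; rw [hU]; simp
          rw [pvStep_none _ _ hS hW hU, ih]
          simp only [List.filter_cons, hS, hw, hu, Bool.false_eq_true, if_false]

-- a digit-only token contains none of the unit substrings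
theorem pvDigit_no_unit (p : String) (hd : PySem.Str.strIsdigit p = true) :
    (["px", "%", "em", "pt", "rem"].any (fun u => PySem.Str.isIn u p)) = false := by
  rw [List.any_eq_false]
  intro u hu hin
  rw [PySem.Str.isIn_iff_infix] at hin
  have hsub := hin.sublist.subset
  simp only [PySem.Str.strIsdigit, PySem.Chars.strIsdigit, Bool.and_eq_true, List.all_eq_true] at hd
  fin_cases hu <;>
    first
    | exact absurd (hd.2 'p' (hsub (by decide))) (by decide)
    | exact absurd (hd.2 '%' (hsub (by decide))) (by decide)
    | exact absurd (hd.2 'e' (hsub (by decide))) (by decide)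

-- A's weight category coincides with B's weight filter
theorem pvQW_eq (p : String) :
    pvQW p = (["bold", "bolder", "lighter"].contains p || PySem.Str.strIsdigit p) := by
  by_cases h1 : p = "italic"
  · subst h1; decide
  by_cases h2 : p = "oblique"
  · subst h2; decide
  by_cases h3 : p = "normal"
  · subst h3; decide
  simp [pvQW, pvQS, h1, h2, h3]

-- A's size category coincides with B's size filter
theorem pvQU_eq (p : String) :
    pvQU p = ["px", "%", "em", "pt", "rem"].any (fun u => PySem.Str.isIn u p) := by
  by_cases h1 : p = "italic"
  · subst h1; decide
  by_cases h2 : p = "oblique"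
  · subst h2; decide
  by_cases h3 : p = "normal"
  · subst h3; decide
  by_cases h4 : p = "bold"
  · subst h4; decide
  by_cases h5 : p = "bolder"
  · subst h5; decide
  by_cases h6 : p = "lighter"
  · subst h6; decide
  cases hd : PySem.Str.strIsdigit p with
  | true =>
    have h0 := pvDigit_no_unit p hd
    rw [h0]
    unfold pvQU
    rw [h0]
    simp
  | false =>
    have hd' : PySem.Chars.strIsdigit p.toList = false := hd
    unfold pvQU pvQS
    simp [h1, h2, h3, h4, h5, h6, hd']

-- B's `xs[-1] if xs else d` is getLastD
theorem pvLastD (xs : List String) (d : String) :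
    (if xs == [] then d else PySem.List.pyGetD xs (-1) d) = xs.getLastD d := by
  cases xs with
  | nil => rfl
  | cons x l =>
    rw [if_neg (by simp)]
    rw [PySem.List.pyGetD_neg_one (x :: l) d (by simp)]
    simp [List.getLastD_eq_getLast?, List.getLast?_eq_some_getLast]

-- token counts other than 1..4 are absent from the layout table
theorem pvLayouts_getD_other (n : Int) (h1 : n ≠ 1) (h2 : n ≠ 2) (h3 : n ≠ 3) (h4 : n ≠ 4) :
    pvLayouts.getD n [] = [] := by
  have e : pvLayouts = PySem.Dict.mk
    [(1, [("top", 0), ("right", 0), ("bottom", 0), ("left", 0)]),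
     (2, [("top", 0), ("bottom", 0), ("right", 1), ("left", 1)]),
     (3, [("top", 0), ("right", 1), ("left", 1), ("bottom", 2)]),
     (4, [("top", 0), ("right", 1), ("bottom", 2), ("left", 3)])] := rfl
  rw [e]
  simp [PySem.Dict.getD, PySem.Dict.get?,
    Ne.symm h1, Ne.symm h2, Ne.symm h3, Ne.symm h4]

-- the margin/padding bodies of A and B agree for a fixed prop ("margin" or "padding" below)
theorem pvQuad_margin (parts : List String) :
    (if parts.length == 1 then
        ((((PySem.Dict.empty).insert "margin-top" (PySem.List.pyGetD parts 0 "")).insert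
            "margin-right" (PySem.List.pyGetD parts 0 "")).insert
            "margin-bottom" (PySem.List.pyGetD parts 0 "")).insert
            "margin-left" (PySem.List.pyGetD parts 0 "")
      else if parts.length == 2 then
        ((((PySem.Dict.empty).insert "margin-top" (PySem.List.pyGetD parts 0 "")).insert
            "margin-bottom" (PySem.List.pyGetD parts 0 "")).insert
            "margin-right" (PySem.List.pyGetD parts 1 "")).insert
            "margin-left" (PySem.List.pyGetD parts 1 "")
      else if parts.length == 3 then
        ((((PySem.Dict.empty).insert "margin-top" (PySem.List.pyGetD parts 0 "")).insert
            "margin-right" (PySem.List.pyGetD parts 1 "")).insert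
            "margin-left" (PySem.List.pyGetD parts 1 "")).insert
            "margin-bottom" (PySem.List.pyGetD parts 2 "")
      else if parts.length == 4 then
        ((((PySem.Dict.empty).insert "margin-top" (PySem.List.pyGetD parts 0 "")).insert
            "margin-right" (PySem.List.pyGetD parts 1 "")).insert
            "margin-bottom" (PySem.List.pyGetD parts 2 "")).insert
            "margin-left" (PySem.List.pyGetD parts 3 "")
      else PySem.Dict.empty).items =
    ((pvLayouts.getD (PySem.List.len parts) []).foldl
        (fun (d : PySem.Dict String String) si =>
          d.insert ("margin" ++ "-" ++ si.1) (PySem.List.pyGetD parts si.2 "")) PySem.Dict.empty).items := by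
  match parts with
  | [] => rfl
  | [a] => rfl
  | [a, b] => rfl
  | [a, b, c] => rfl
  | [a, b, c, d] => rfl
  | a :: b :: c :: d :: e :: rest =>
    have hn : PySem.List.len (a :: b :: c :: d :: e :: rest) = ((rest.length : Int) + 5) := by
      simp [PySem.List.len_eq]; ring
    rw [hn, pvLayouts_getD_other _ (by omega) (by omega) (by omega) (by omega)]
    simp

theorem pvQuad_padding (parts : List String) :
    (if parts.length == 1 then
        ((((PySem.Dict.empty).insert "padding-top" (PySem.List.pyGetD parts 0 "")).insert
            "padding-right" (PySem.List.pyGetD parts 0 "")).insert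
            "padding-bottom" (PySem.List.pyGetD parts 0 "")).insert
            "padding-left" (PySem.List.pyGetD parts 0 "")
      else if parts.length == 2 then
        ((((PySem.Dict.empty).insert "padding-top" (PySem.List.pyGetD parts 0 "")).insert
            "padding-bottom" (PySem.List.pyGetD parts 0 "")).insert
            "padding-right" (PySem.List.pyGetD parts 1 "")).insert
            "padding-left" (PySem.List.pyGetD parts 1 "")
      else if parts.length == 3 then
        ((((PySem.Dict.empty).insert "padding-top" (PySem.List.pyGetD parts 0 "")).insert
            "padding-right" (PySem.List.pyGetD parts 1 "")).insert
            "padding-left" (PySem.List.pyGetD parts 1 "")).insert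
            "padding-bottom" (PySem.List.pyGetD parts 2 "")
      else if parts.length == 4 then
        ((((PySem.Dict.empty).insert "padding-top" (PySem.List.pyGetD parts 0 "")).insert
            "padding-right" (PySem.List.pyGetD parts 1 "")).insert
            "padding-bottom" (PySem.List.pyGetD parts 2 "")).insert
            "padding-left" (PySem.List.pyGetD parts 3 "")
      else PySem.Dict.empty).items =
    ((pvLayouts.getD (PySem.List.len parts) []).foldl
        (fun (d : PySem.Dict String String) si =>
          d.insert ("padding" ++ "-" ++ si.1) (PySem.List.pyGetD parts si.2 "")) PySem.Dict.empty).items := by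
  match parts with
  | [] => rfl
  | [a] => rfl
  | [a, b] => rfl
  | [a, b, c] => rfl
  | [a, b, c, d] => rfl
  | a :: b :: c :: d :: e :: rest =>
    have hn : PySem.List.len (a :: b :: c :: d :: e :: rest) = ((rest.length : Int) + 5) := by
      simp [PySem.List.len_eq]; ring
    rw [hn, pvLayouts_getD_other _ (by omega) (by omega) (by omega) (by omega)]
    simp

-- the font bodies of A and B agree
theorem pvFont_eq (parts : List String) :
    (let res := parts.foldl pvFontStep ("normal", "normal", none)
     let expanded : PySem.Dict String String :=
      match res.2.2 with
      | none => PySem.Dict.empty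
      | some sz =>
        if sz == "" then PySem.Dict.empty
        else (((PySem.Dict.empty).insert "font-style" res.1).insert "font-weight" res.2.1).insert
              "font-size" sz
     expanded.items) =
    (let styles := parts.filter (fun p => ["italic", "oblique", "normal"].contains p)
     let weights := parts.filter
       (fun p => ["bold", "bolder", "lighter"].contains p || PySem.Str.strIsdigit p)
     let sizes := parts.filter
       (fun p => ["px", "%", "em", "pt", "rem"].any (fun u => PySem.Str.isIn u p))
     if sizes == [] then []
     else
      ((((PySem.Dict.empty).insert "font-style"
            (if styles == [] then "normal" else PySem.List.pyGetD styles (-1) "normal")).insert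
          "font-weight"
            (if weights == [] then "normal" else PySem.List.pyGetD weights (-1) "normal")).insert
          "font-size" (PySem.List.pyGetD sizes (-1) "normal")).items) := by
  simp only [pvFold_eq, pvLastD]
  have hW : parts.filter pvQW = parts.filter
      (fun p => ["bold", "bolder", "lighter"].contains p || PySem.Str.strIsdigit p) :=
    List.filter_congr (fun x _ => pvQW_eq x)
  have hU : parts.filter pvQU = parts.filter
      (fun p => ["px", "%", "em", "pt", "rem"].any (fun u => PySem.Str.isIn u p)) :=
    List.filter_congr (fun x _ => pvQU_eq x)
  have hS : parts.filter pvQS = parts.filter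
      (fun p => ["italic", "oblique", "normal"].contains p) := rfl
  rw [hW, hU, hS]
  rcases List.eq_nil_or_concat
      (parts.filter (fun p => ["px", "%", "em", "pt", "rem"].any (fun u => PySem.Str.isIn u p)))
    with h | ⟨l, x, h⟩
  · rw [h]; rfl
  · rw [h]
    have hx : (["px", "%", "em", "pt", "rem"].any (fun u => PySem.Str.isIn u x)) = true := by
      have : x ∈ parts.filter (fun p => ["px", "%", "em", "pt", "rem"].any
          (fun u => PySem.Str.isIn u p)) := by rw [h]; simp
      exact (List.mem_filter.mp this).2
    have hxne : x ≠ "" := by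
      rintro rfl
      rw [show (["px", "%", "em", "pt", "rem"].any (fun u => PySem.Str.isIn u "")) = false
        from by decide] at hx
      cases hx
    simp [hxne, PySem.List.pyGetD_neg_one_append_singleton]

-- ===== VERDICT (by name: the statement is the Claim_ definition above) =====
theorem expand_shorthand_spec : Claim_equal_expand_shorthand := by
  intro prop val _
  unfold Spec_expand_shorthand expand_shorthand expand_shorthand_alt
  by_cases hf : prop = "font"
  · subst hf
    simp only [if_pos (by rfl : (("font" : String) == "font") = true)]
    exact pvFont_eq (PySem.Str.split₀ val)
  · by_cases hm : prop = "margin"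
    · subst hm
      rw [if_neg (by decide), if_pos (by rfl : (("margin" : String) == "margin") = true)]
      rw [if_neg (by decide), if_pos (by decide : (("margin" : String) == "margin" || ("margin" : String) == "padding") = true)]
      exact pvQuad_margin (PySem.Str.split₀ val)
    · by_cases hp : prop = "padding"
      · subst hp
        rw [if_neg (by decide), if_neg (by decide), if_pos (by rfl : (("padding" : String) == "padding") = true)]
        rw [if_neg (by decide), if_pos (by decide : (("padding" : String) == "margin" || ("padding" : String) == "padding") = true)]
        exact pvQuad_padding (PySem.Str.split₀ val)
      · rw [if_neg (by simp [hf]), if_neg (by simp [hm]), if_neg (by simp [hp])]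
        rw [if_neg (by simp [hf]), if_neg (by simp [hm, hp])]
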